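-- pv_equiv track=rewrite | github.com/Grumpified-OGGVCT/BrowserOS_Guides | scripts/repo_tracker.py | _parse_changelog
-- ===== SOURCE A (Python) =====
-- from typing import Dict, List, Optional, Any
--
-- def _parse_changelog(text: str) -> Dict[str, Any]:
--     """Parse changelog markdown into structured data"""
--     entries = {}
--     current_version = None
--     current_content = []
--
--     for line in text.split('\n'):
--         # Detect version headers (e.g., ## [1.0.0] - 2024-01-01)
--         if line.startswith('## '):
--             if current_version:
--                 entries[current_version] = '\n'.join(current_content)
--             current_version = line.replace('##', '').strip()
--             current_content = []
--         elif current_version: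
--             current_content.append(line)
--
--     # Add last version
--     if current_version:
--         entries[current_version] = '\n'.join(current_content)
--
--     return entries
-- ===== SOURCE B (Python) =====
-- def _split_at_header(lines):
--     """Split a line list at the first '## ' header: (prefix, suffix-from-header)."""
--     for k, line in enumerate(lines):
--         if line.startswith('## '):
--             return lines[:k], lines[k:]
--     return lines, []
--
--
-- def _parse_changelog(text):
--     """Parse changelog markdown into structured data"""
--     _, rest = _split_at_header(text.split('\n'))
--     entries = {}
--     while rest:
--         version = rest[0].replace('##', '').strip()
--         body, rest = _split_at_header(rest[1:])
--         if version:
--             entries[version] = '\n'.join(body)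
--     return entries
-- ===== Notes on version B (the rewrite author's own statement) =====
-- stated objective: alternative
-- what changed: Replaces A's single-pass streaming state machine (current_version/current_content accumulators flushed at each header) with a split-at-next-header decomposition: skip the preamble, then repeatedly cut the line list at the next version header and emit each section's body in one slice.
import Mathlib
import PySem

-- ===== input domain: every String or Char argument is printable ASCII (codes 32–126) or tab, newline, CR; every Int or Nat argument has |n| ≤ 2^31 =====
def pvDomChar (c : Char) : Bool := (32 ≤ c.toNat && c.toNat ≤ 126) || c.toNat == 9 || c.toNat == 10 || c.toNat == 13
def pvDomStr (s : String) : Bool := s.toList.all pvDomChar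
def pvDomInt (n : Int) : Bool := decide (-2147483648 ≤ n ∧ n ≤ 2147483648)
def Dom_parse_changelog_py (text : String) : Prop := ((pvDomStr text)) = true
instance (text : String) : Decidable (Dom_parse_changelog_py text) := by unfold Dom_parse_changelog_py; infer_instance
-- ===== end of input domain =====

-- B replaces A's streaming accumulator with a split-at-next-header decomposition (alternative, same cost).

-- ===== PORT A =====
-- Python truthiness of current_version (None or a str)
def pvTruthy : Option String → Bool
  | none => false
  | some v => v != ""

-- one iteration of A's for-loop; state = (entries, current_version, current_content)
def pvAStep (st : PySem.Dict String String × Option String × List String) (line : String) :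
    PySem.Dict String String × Option String × List String :=
  if PySem.Str.startswith line "## " then
    ((if pvTruthy st.2.1 then st.1.insert (st.2.1.getD "") (PySem.Str.join "\n" st.2.2) else st.1),
     some (PySem.Str.strip (PySem.Str.replace line "##" "")), [])
  else if pvTruthy st.2.1 then (st.1, st.2.1, st.2.2 ++ [line]) else st

-- the final "Add last version" flush
def pvAFin (st : PySem.Dict String String × Option String × List String) : PySem.Dict String String :=
  if pvTruthy st.2.1 then st.1.insert (st.2.1.getD "") (PySem.Str.join "\n" st.2.2) else st.1

def parse_changelog_py (text : String) : List (String × String) :=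
  (pvAFin (((PySem.Str.split? text "\n").getD []).foldl pvAStep (PySem.Dict.empty, none, []))).items

-- ===== PORT B =====
-- Source B's _split_at_header: (lines[:k], lines[k:]) at the first '## ' header
def pvSplitAtHeader : List String → List String × List String
  | [] => ([], [])
  | l :: ls =>
    if PySem.Str.startswith l "## " then ([], l :: ls)
    else
      let (pre, rest) := pvSplitAtHeader ls
      (l :: pre, rest)

-- needed for pvBLoop's termination
theorem pvSplitAtHeader_snd_len (ls : List String) : (pvSplitAtHeader ls).2.length ≤ ls.length := by
  induction ls with
  | nil => simp [pvSplitAtHeader]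
  | cons l ls ih =>
    simp only [pvSplitAtHeader]
    split
    · simp
    · simpa using Nat.le_succ_of_le ih

-- Source B's while-loop over the remaining lines (rest)
def pvBLoop (entries : PySem.Dict String String) (rest : List String) : PySem.Dict String String :=
  match rest with
  | [] => entries
  | h :: t =>
    let version := PySem.Str.strip (PySem.Str.replace h "##" "")
    let p := pvSplitAtHeader t
    pvBLoop (if version ≠ "" then entries.insert version (PySem.Str.join "\n" p.1) else entries) p.2
termination_by rest.length
decreasing_by
  exact Nat.lt_succ_of_le (pvSplitAtHeader_snd_len t)

def parse_changelog_py_alt (text : String) : List (String × String) :=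
  (pvBLoop PySem.Dict.empty (pvSplitAtHeader ((PySem.Str.split? text "\n").getD [])).2).items

-- ===== PRECONDITION & SPEC =====
def Spec_parse_changelog_py (text : String) (out : List (String × String)) : Prop := out = parse_changelog_py_alt text
instance (text : String) (out : List (String × String)) : Decidable (Spec_parse_changelog_py text out) := by unfold Spec_parse_changelog_py; infer_instance

-- ===== CLAIM (what is proved, stated in full; the proofs are below) =====
def Claim_equal_parse_changelog_py : Prop := ∀ (text : String), Dom_parse_changelog_py text → Spec_parse_changelog_py text (parse_changelog_py text)

-- ===== LEMMAS AND PROOFS =====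

theorem pvSplit_append (ls : List String) :
    (pvSplitAtHeader ls).1 ++ (pvSplitAtHeader ls).2 = ls := by
  induction ls with
  | nil => simp [pvSplitAtHeader]
  | cons l ls ih =>
    simp only [pvSplitAtHeader]
    split
    · simp
    · simpa using ih

theorem pvSplit_fst_no_header (ls : List String) :
    ∀ l ∈ (pvSplitAtHeader ls).1, PySem.Str.startswith l "## " = false := by
  induction ls with
  | nil => simp [pvSplitAtHeader]
  | cons l ls ih =>
    simp only [pvSplitAtHeader]
    split
    · simp
    · rename_i h
      intro x hx
      rcases List.mem_cons.1 (by simpa using hx) with rfl | hx'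
      · simpa using h
      · exact ih x hx'

-- folding A's step over header-free lines from a truthy state appends them to the content
theorem pvFold_skip_truthy (pre : List String)
    (hpre : ∀ l ∈ pre, PySem.Str.startswith l "## " = false) :
    ∀ (rest : List String) (d : PySem.Dict String String) (v : String), v ≠ "" →
      ∀ (cc : List String),
      List.foldl pvAStep (d, some v, cc) (pre ++ rest)
        = List.foldl pvAStep (d, some v, cc ++ pre) rest := by
  induction pre with
  | nil => intro rest d v hv cc; simp
  | cons p pre ih =>
    intro rest d v hv cc
    have hp := hpre p (by simp)
    have hrest : ∀ l ∈ pre, PySem.Str.startswith l "## " = false :=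
      fun l hl => hpre l (List.mem_cons_of_mem _ hl)
    have htr : pvTruthy (some v) = true := by
      simp [pvTruthy]; exact hv
    simp only [List.cons_append, List.foldl_cons, pvAStep, hp, htr]
    simpa [List.append_assoc] using ih hrest rest d v hv (cc ++ [p])

-- folding A's step over header-free lines from a falsy state changes nothing
theorem pvFold_skip_falsy (pre : List String)
    (hpre : ∀ l ∈ pre, PySem.Str.startswith l "## " = false) :
    ∀ (rest : List String) (d : PySem.Dict String String) (cv : Option String),
      pvTruthy cv = false →
      ∀ (cc : List String),
      List.foldl pvAStep (d, cv, cc) (pre ++ rest)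
        = List.foldl pvAStep (d, cv, cc) rest := by
  induction pre with
  | nil => intro rest d cv hcv cc; simp
  | cons p pre ih =>
    intro rest d cv hcv cc
    have hp := hpre p (by simp)
    have hrest : ∀ l ∈ pre, PySem.Str.startswith l "## " = false :=
      fun l hl => hpre l (List.mem_cons_of_mem _ hl)
    simp only [List.cons_append, List.foldl_cons, pvAStep, hp, hcv]
    simp only [Bool.false_eq_true, if_false]
    exact ih hrest rest d cv hcv cc

-- the head of pvSplitAtHeader's suffix, when nonempty, is a header line
theorem pvSplit_snd_head : ∀ (ls : List String) (h : String) (t : List String),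
    (pvSplitAtHeader ls).2 = h :: t → PySem.Str.startswith h "## " = true := by
  intro ls
  induction ls with
  | nil => intro h t hrest; simp [pvSplitAtHeader] at hrest
  | cons l ls ih =>
    intro h t hrest
    simp only [pvSplitAtHeader] at hrest
    split at hrest
    · rename_i hc
      obtain ⟨rfl, rfl⟩ := List.cons.injEq .. ▸ hrest
      simpa using hc
    · exact ih h t (by simpa using hrest)

-- main invariant: A's finalized fold equals B's loop, for falsy and truthy states
theorem pvMain (n : ℕ) : ∀ (ls : List String), ls.length ≤ n →
    (∀ (d : PySem.Dict String String) (cv : Option String), pvTruthy cv = false →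
       ∀ (cc : List String),
       pvAFin (List.foldl pvAStep (d, cv, cc) ls) = pvBLoop d (pvSplitAtHeader ls).2)
  ∧ (∀ (d : PySem.Dict String String) (v : String), v ≠ "" → ∀ (cc : List String),
       pvAFin (List.foldl pvAStep (d, some v, cc) ls)
         = pvBLoop (d.insert v (PySem.Str.join "\n" (cc ++ (pvSplitAtHeader ls).1)))
             (pvSplitAtHeader ls).2) := by
  induction n with
  | zero =>
    intro ls hls
    have hnil : ls = [] := List.length_eq_zero_iff.1 (Nat.le_zero.1 hls)
    subst hnil
    constructor
    · intro d cv hcv cc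
      simp [pvSplitAtHeader, pvBLoop, pvAFin, hcv]
    · intro d v hv cc
      have htr : pvTruthy (some v) = true := by simp [pvTruthy]; exact hv
      simp [pvSplitAtHeader, pvBLoop, pvAFin, htr]
  | succ n ih =>
    intro ls hls
    rcases hsp : pvSplitAtHeader ls with ⟨body, rest⟩
    have hsplit : body ++ rest = ls := by
      have := pvSplit_append ls; rwa [hsp] at this
    have hnoh : ∀ l ∈ body, PySem.Str.startswith l "## " = false := by
      have := pvSplit_fst_no_header ls; rwa [hsp] at this
    rcases rest with _ | ⟨h, t⟩
    · -- no header in ls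
      constructor
      · intro d cv hcv cc
        rw [← hsplit, pvFold_skip_falsy _ hnoh [] d cv hcv cc]
        simp [pvBLoop, pvAFin, hcv]
      · intro d v hv cc
        rw [← hsplit, pvFold_skip_truthy _ hnoh [] d v hv cc]
        have htr : pvTruthy (some v) = true := by simp [pvTruthy]; exact hv
        simp [pvBLoop, pvAFin, htr]
    · -- first header h, tail t
      have hh : PySem.Str.startswith h "## " = true := pvSplit_snd_head ls h t (by rw [hsp])
      have hh' : PySem.Chars.startswith h.toList ['#', '#', ' '] = true := by simpa using hh
      have ht_len : t.length ≤ n := by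
        have h1 : (h :: t).length ≤ ls.length := by
          have := pvSplitAtHeader_snd_len ls; rwa [hsp] at this
        simp only [List.length_cons] at h1
        omega
      -- the step at the header line h, from any state
      have hstep_truthy : ∀ (d : PySem.Dict String String) (v : String), v ≠ "" →
          ∀ (cc : List String),
          pvAStep (d, some v, cc) h
            = (d.insert v (PySem.Str.join "\n" cc),
               some (PySem.Str.strip (PySem.Str.replace h "##" "")), []) := by
        intro d v hv cc
        have htr : pvTruthy (some v) = true := by simp [pvTruthy]; exact hv
        simp [pvAStep, hh', htr]
      have hstep_falsy : ∀ (d : PySem.Dict String String) (cv : Option String),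
          pvTruthy cv = false → ∀ (cc : List String),
          pvAStep (d, cv, cc) h
            = (d, some (PySem.Str.strip (PySem.Str.replace h "##" "")), []) := by
        intro d cv hcv cc
        simp [pvAStep, hh', hcv]
      -- continuing from the fresh state after the header equals one pass of B's loop
      have hcont : ∀ (d : PySem.Dict String String),
          pvAFin (List.foldl pvAStep
              (d, some (PySem.Str.strip (PySem.Str.replace h "##" "")), []) t)
            = pvBLoop d (h :: t) := by
        intro d
        rw [pvBLoop]
        by_cases hv2e : PySem.Str.strip (PySem.Str.replace h "##" "") = ""
        · have := (ih t ht_len).1 d (some (PySem.Str.strip (PySem.Str.replace h "##" "")))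
            (by simp [pvTruthy, hv2e]) []
          rw [this]
          simp [hv2e]
        · have := (ih t ht_len).2 d (PySem.Str.strip (PySem.Str.replace h "##" "")) hv2e []
          rw [this]
          simp [hv2e]
      constructor
      · intro d cv hcv cc
        rw [← hsplit, pvFold_skip_falsy _ hnoh _ d cv hcv cc, List.foldl_cons,
            hstep_falsy d cv hcv cc, hcont d]
      · intro d v hv cc
        rw [← hsplit, pvFold_skip_truthy _ hnoh _ d v hv cc, List.foldl_cons,
            hstep_truthy d v hv _, hcont]

-- ===== VERDICT (by name: the statement is the Claim_ definition above) =====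
theorem parse_changelog_py_spec : Claim_equal_parse_changelog_py := by
  intro text _
  unfold Spec_parse_changelog_py parse_changelog_py parse_changelog_py_alt
  have := (pvMain ((PySem.Str.split? text "\n").getD []).length
    ((PySem.Str.split? text "\n").getD []) le_rfl).1 PySem.Dict.empty none rfl []
  rw [this]
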